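-- pv_equiv track=rewrite | github.com/kventinel/moexapi | moexapi/boards.py | get_main_board
-- ===== SOURCE A (Python) =====
-- import typing as T
--
-- def _check_tier(boards: T.Sequence[str], names: T.Sequence[str]) -> T.Optional[str]:
--     boards = [board for board in boards if board in names]
--     if len(boards) > 1:
--         raise RuntimeError(f"Can't compare boards {boards}")
--     if len(boards) == 1:
--         return boards[0]
--     return None
--
-- def get_main_board(boards: list[str]) -> str:
--     if len(boards) == 1:
--         return boards[0]
--     NAMES = (
--         ("TQCB", "TQBR", "TQTF", "CETS", "TQIF"),
--         ("TQOB", "TQIR", "TQRD", "TQPI", "CNGD", "FIXS"),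
--     )
--     for tier in NAMES:
--         board = _check_tier(boards, tier)
--         if board:
--             return board
--     raise RuntimeError(
--         f"Can't compare boards {boards}, you can find some info about boards at "
--         "https://iss.moex.com/iss/engines/stock/markets/bonds/boards"
--     )
-- ===== SOURCE B (Python) =====
-- _TIERS = (
--     ("TQCB", "TQBR", "TQTF", "CETS", "TQIF"),
--     ("TQOB", "TQIR", "TQRD", "TQPI", "CNGD", "FIXS"),
-- )
-- _TIER_OF = {name: i for i, tier in enumerate(_TIERS) for name in tier}
--
-- def get_main_board(boards: list[str]) -> str:
--     if len(boards) == 1: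
--         return boards[0]
--     buckets = [[] for _ in _TIERS]
--     for board in boards:
--         i = _TIER_OF.get(board)
--         if i is not None:
--             buckets[i].append(board)
--     for bucket in buckets:
--         if bucket:
--             if len(bucket) > 1:
--                 raise RuntimeError(f"Can't compare boards {bucket}")
--             return bucket[0]
--     raise RuntimeError(
--         f"Can't compare boards {boards}, you can find some info about boards at "
--         "https://iss.moex.com/iss/engines/stock/markets/bonds/boards"
--     )
-- ===== Notes on version B (the rewrite author's own statement) =====
-- stated objective: idiomatic
-- what changed: Replaces the per-tier filtering helper (one scan of boards per tier) with a name-to-tier dict built once and a single pass over boards that distributes matches into per-tier buckets, then picks from the first non-empty bucket.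
import Mathlib
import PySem

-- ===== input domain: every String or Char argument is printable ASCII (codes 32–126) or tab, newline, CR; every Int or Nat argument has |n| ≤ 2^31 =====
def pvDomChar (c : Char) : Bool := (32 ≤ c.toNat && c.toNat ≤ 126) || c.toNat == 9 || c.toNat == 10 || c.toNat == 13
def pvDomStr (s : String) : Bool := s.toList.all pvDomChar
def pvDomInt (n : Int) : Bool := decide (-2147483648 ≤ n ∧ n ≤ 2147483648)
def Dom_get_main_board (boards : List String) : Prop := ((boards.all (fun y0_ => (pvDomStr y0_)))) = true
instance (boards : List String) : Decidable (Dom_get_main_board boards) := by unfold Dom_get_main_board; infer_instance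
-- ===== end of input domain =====

-- B replaces A's per-tier filtering helper (one scan of boards per tier) by a name→tier dict
-- built once and a single bucketing pass over boards (objective: more idiomatic structure).

-- ===== PORT A =====
def pvTier1 : List String := ["TQCB", "TQBR", "TQTF", "CETS", "TQIF"]
def pvTier2 : List String := ["TQOB", "TQIR", "TQRD", "TQPI", "CNGD", "FIXS"]

-- _check_tier: 'none' = the RuntimeError raise (excluded by Pre_), 'some none' = Python None,
-- 'some (some b)' = return b
def pvCheckTier (boards names : List String) : Option (Option String) :=
  let bs := boards.filter (fun b => names.contains b)
  if bs.length > 1 then none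
  else if bs.length = 1 then some (some ((PySem.List.pyGet? bs 0).getD ""))
  else some none

-- the 'for tier in NAMES' loop of A
def pvLoopA (boards : List String) : List (List String) → String
  | [] => ""    -- final RuntimeError (excluded by Pre_)
  | tier :: rest =>
    match pvCheckTier boards tier with
    | none => ""                       -- RuntimeError inside _check_tier (excluded by Pre_)
    | some (some board) => if board ≠ "" then board else pvLoopA boards rest
    | some none => pvLoopA boards rest

def get_main_board (boards : List String) : String :=
  if boards.length = 1 then (PySem.List.pyGet? boards 0).getD ""
  else pvLoopA boards [pvTier1, pvTier2]

-- ===== PORT B =====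
-- _TIER_OF of Source B
def pvTierOf : PySem.Dict String Int :=
  PySem.Dict.ofList
    [("TQCB", 0), ("TQBR", 0), ("TQTF", 0), ("CETS", 0), ("TQIF", 0),
     ("TQOB", 1), ("TQIR", 1), ("TQRD", 1), ("TQPI", 1), ("CNGD", 1), ("FIXS", 1)]

-- the 'for bucket in buckets' loop of Source B
def pvPickB : List (List String) → String
  | [] => ""          -- final RuntimeError (excluded by Pre_)
  | bucket :: rest =>
    if bucket ≠ [] then
      if bucket.length > 1 then ""    -- RuntimeError (excluded by Pre_)
      else (PySem.List.pyGet? bucket 0).getD ""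
    else pvPickB rest

def get_main_board_alt (boards : List String) : String :=
  if boards.length = 1 then (PySem.List.pyGet? boards 0).getD ""
  else
    let buckets : List (List String) :=
      boards.foldl (fun bk b =>
        match PySem.Dict.get? pvTierOf b with
        | some i => bk.modify i.toNat (fun l => l ++ [b])
        | none => bk) [[], []]
    pvPickB buckets

-- ===== PRECONDITION & SPEC =====
-- Pre_ excludes exactly the inputs on which A raises RuntimeError: more than one board in the
-- deciding tier, or (with boards.length ≠ 1) no board in either tier.
def Pre_get_main_board (boards : List String) : Prop :=
  boards.length = 1 ∨
    ((boards.filter (fun b => pvTier1.contains b)).length = 1 ∨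
     ((boards.filter (fun b => pvTier1.contains b)).length = 0 ∧
      (boards.filter (fun b => pvTier2.contains b)).length = 1))
instance (boards : List String) : Decidable (Pre_get_main_board boards) := by
  unfold Pre_get_main_board; infer_instance

def pvWitness_get_main_board : List String := ["TQCB", "XXX"]

def Spec_get_main_board (boards : List String) (out : String) : Prop := out = get_main_board_alt boards
instance (boards : List String) (out : String) : Decidable (Spec_get_main_board boards out) := by
  unfold Spec_get_main_board; infer_instance

-- ===== CLAIM (what is proved, stated in full; the proofs are below) =====
def Claim_equal_get_main_board : Prop := ∀ (boards : List String), Dom_get_main_board boards → Pre_get_main_board boards → Spec_get_main_board boards (get_main_board boards)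

-- ===== LEMMAS AND PROOFS =====

set_option maxRecDepth 4000 in
set_option maxHeartbeats 1000000 in
lemma pvTierOf_get (b : String) :
    PySem.Dict.get? pvTierOf b =
      (if b ∈ pvTier1 then some 0
       else if b ∈ pvTier2 then some (1 : Int) else none) := by
  simp only [pvTierOf, PySem.Dict.ofList, PySem.Dict.update, List.foldl_cons, List.foldl_nil,
    PySem.Dict.get?_insert, PySem.Dict.get?_empty]
  simp [pvTier1, pvTier2]
  split_ifs <;> simp_all

lemma pvNotTier2_of_tier1 (b : String) (h : b ∈ pvTier1) : b ∉ pvTier2 := by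
  simp [pvTier1] at h
  rcases h with h | h | h | h | h <;> subst h <;> decide

lemma pvBuckets_eq (boards : List String) (l1 l2 : List String) :
    boards.foldl (fun bk b =>
        match PySem.Dict.get? pvTierOf b with
        | some i => bk.modify i.toNat (fun l => l ++ [b])
        | none => bk) [l1, l2]
      = [l1 ++ boards.filter (fun b => pvTier1.contains b),
         l2 ++ boards.filter (fun b => pvTier2.contains b)] := by
  induction boards generalizing l1 l2 with
  | nil => simp
  | cons b bs ih =>
    simp only [List.foldl_cons, pvTierOf_get b, List.filter_cons]
    by_cases h1 : b ∈ pvTier1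
    · rw [if_pos h1]
      have hm : [l1, l2].modify (Int.toNat 0) (fun l => l ++ [b]) = [l1 ++ [b], l2] := rfl
      simp only [hm, ih]
      have h2 := pvNotTier2_of_tier1 b h1
      simp [h1, h2]
    · by_cases h2 : b ∈ pvTier2
      · rw [if_neg h1, if_pos h2]
        have hm : [l1, l2].modify (Int.toNat 1) (fun l => l ++ [b]) = [l1, l2 ++ [b]] := rfl
        simp only [hm, ih]
        simp [h1, h2]
      · rw [if_neg h1, if_neg h2]
        simp only [ih]
        simp [h1, h2]

lemma pvCheckTier_of_one (boards names : List String) (x : String)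
    (hx : boards.filter (fun b => names.contains b) = [x]) :
    pvCheckTier boards names = some (some x) := by
  simp only [List.contains_eq_mem] at hx
  simp [pvCheckTier, hx, PySem.List.pyGet?, PySem.List.pyIdx?]

lemma pvCheckTier_of_nil (boards names : List String)
    (hx : boards.filter (fun b => names.contains b) = []) :
    pvCheckTier boards names = some none := by
  simp only [List.contains_eq_mem] at hx
  simp [pvCheckTier, hx]

lemma pvTier1_ne_empty (b : String) (h : b ∈ pvTier1) : b ≠ "" := by
  simp [pvTier1] at h
  rcases h with h | h | h | h | h <;> subst h <;> decide

lemma pvTier2_ne_empty (b : String) (h : b ∈ pvTier2) : b ≠ "" := by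
  simp [pvTier2] at h
  rcases h with h | h | h | h | h | h <;> subst h <;> decide

lemma pvLoopA_eq_pick (boards : List String)
    (hpre : (boards.filter (fun b => pvTier1.contains b)).length = 1 ∨
      ((boards.filter (fun b => pvTier1.contains b)).length = 0 ∧
       (boards.filter (fun b => pvTier2.contains b)).length = 1)) :
    pvLoopA boards [pvTier1, pvTier2]
      = pvPickB [boards.filter (fun b => pvTier1.contains b),
                 boards.filter (fun b => pvTier2.contains b)] := by
  rcases hpre with h1 | ⟨h0, h2⟩
  · obtain ⟨x, hx⟩ := List.length_eq_one_iff.mp h1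
    have hxt : x ∈ pvTier1 := by
      have : x ∈ boards.filter (fun b => pvTier1.contains b) := by rw [hx]; simp
      simpa using (List.mem_filter.mp this).2
    have hne := pvTier1_ne_empty x hxt
    rw [hx]
    simp [pvLoopA, pvCheckTier_of_one boards pvTier1 x hx, hne, pvPickB,
      PySem.List.pyGet?, PySem.List.pyIdx?]
  · have hx0 : boards.filter (fun b => pvTier1.contains b) = [] :=
      List.length_eq_zero_iff.mp h0
    obtain ⟨x, hx⟩ := List.length_eq_one_iff.mp h2
    have hxt : x ∈ pvTier2 := by
      have : x ∈ boards.filter (fun b => pvTier2.contains b) := by rw [hx]; simp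
      simpa using (List.mem_filter.mp this).2
    have hne := pvTier2_ne_empty x hxt
    rw [hx, hx0]
    simp [pvLoopA, pvCheckTier_of_nil boards pvTier1 hx0,
      pvCheckTier_of_one boards pvTier2 x hx, hne, pvPickB,
      PySem.List.pyGet?, PySem.List.pyIdx?]

-- ===== VERDICT (by name: the statement is the Claim_ definition above) =====
theorem get_main_board_spec : Claim_equal_get_main_board := by
  intro boards _ hpre
  unfold Spec_get_main_board get_main_board get_main_board_alt
  by_cases hlen : boards.length = 1
  · simp [hlen]
  · rw [if_neg hlen, if_neg hlen]
    simp only [pvBuckets_eq boards [] [], List.nil_append]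
    rcases hpre with h | hpre'
    · exact absurd h hlen
    · exact pvLoopA_eq_pick boards hpre'
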